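-- pv_equiv track=rewrite | github.com/oscik559/mini_project_repo | mini_project/modalities/synchronizer.py | merge_session_commands
-- ===== SOURCE A (Python) =====
-- from typing import Dict, List, Optional
--
-- DELIMITER = "\n"
--
-- def merge_session_commands(
--     session_commands: List[Dict], delimiter: str = DELIMITER
-- ) -> Dict[str, str]:
--     """
--     Merges instructions from a session into a single string per modality.
--
--     Args:
--         session_commands: List of instruction records for a session.
--         delimiter: String used to join multiple instructions.
--     Returns:
--         A dictionary with merged voice and gesture instructions.
--     """
--     voice_records = [cmd for cmd in session_commands if cmd["modality"] == "voice"]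
--     gesture_records = [cmd for cmd in session_commands if cmd["modality"] == "gesture"]
--
--     voice_records.sort(key=lambda x: x["timestamp"])
--     gesture_records.sort(key=lambda x: x["timestamp"])
--
--     merged_voice = delimiter.join(
--         record["instruction_text"] for record in voice_records
--     ).strip()
--     merged_gesture = delimiter.join(
--         record["instruction_text"] for record in gesture_records
--     ).strip()
--
--     return {"voice": merged_voice, "gesture": merged_gesture}
-- ===== SOURCE B (Python) =====
-- DELIMITER = "\n"
--
-- def merge_session_commands(session_commands, delimiter=DELIMITER):
--     # Single stable sort of the combined (timestamp, modality, text) stream,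
--     # then one pass splitting it into the two merged strings (no per-group
--     # sort and no join()): stability makes the combined order per modality
--     # identical to A's per-group sorts.
--     stream = [
--         (cmd["timestamp"], cmd["modality"], cmd["instruction_text"])
--         for cmd in session_commands
--         if cmd["modality"] in ("voice", "gesture")
--     ]
--     stream.sort(key=lambda t: t[0])
--     merged = {"voice": None, "gesture": None}
--     for _, modality, text in stream:
--         prev = merged[modality]
--         merged[modality] = text if prev is None else prev + delimiter + text
--     return {m: ("" if s is None else s).strip() for m, s in merged.items()}
-- ===== Notes on version B (the rewrite author's own statement) =====
-- stated objective: alternative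
-- what changed: Instead of A's two filter passes, two per-group sorts and two join() calls, B stably sorts the single combined (timestamp, modality, text) stream once and then splits it in one pass, accumulating both merged strings directly; stability of the sort makes the per-modality order identical to A's per-group sorts.
import Mathlib
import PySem

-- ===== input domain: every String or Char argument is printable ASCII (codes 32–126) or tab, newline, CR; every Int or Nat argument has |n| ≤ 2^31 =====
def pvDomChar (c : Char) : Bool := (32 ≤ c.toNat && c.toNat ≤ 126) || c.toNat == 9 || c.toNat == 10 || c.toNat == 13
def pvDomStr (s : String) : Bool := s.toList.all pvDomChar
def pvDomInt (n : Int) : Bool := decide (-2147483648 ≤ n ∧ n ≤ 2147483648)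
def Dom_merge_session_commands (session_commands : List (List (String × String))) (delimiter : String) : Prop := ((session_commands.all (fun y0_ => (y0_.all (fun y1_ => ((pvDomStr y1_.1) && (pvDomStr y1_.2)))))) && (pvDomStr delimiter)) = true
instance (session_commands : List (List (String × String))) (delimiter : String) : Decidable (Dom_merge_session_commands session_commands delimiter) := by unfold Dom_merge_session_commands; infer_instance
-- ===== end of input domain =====

-- B replaces A's two filter passes + two per-group sorts + two join() calls by ONE stable sort
-- of the combined (timestamp, modality, text) stream and a single splitting pass that
-- accumulates both merged strings directly (stability of the sort makes this exact).

-- dict lookup d[k] (first match; Python raises KeyError when absent — Pre_ excludes that)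
def pvLook (d : List (String × String)) (k : String) : String :=
  (((d.find? (fun p => p.1 == k)).map Prod.snd).getD "")

-- k in d
def pvHas (d : List (String × String)) (k : String) : Bool :=
  d.any (fun p => p.1 == k)

-- ===== PORT A =====
def merge_session_commands (session_commands : List (List (String × String))) (delimiter : String) : List (String × String) :=
  let voice_records := session_commands.filter (fun cmd => pvLook cmd "modality" == "voice")
  let gesture_records := session_commands.filter (fun cmd => pvLook cmd "modality" == "gesture")
  let voice_sorted := PySem.List.sorted voice_records (fun x => pvLook x "timestamp") false
  let gesture_sorted := PySem.List.sorted gesture_records (fun x => pvLook x "timestamp") false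
  let merged_voice := PySem.Str.strip (PySem.Str.join delimiter (voice_sorted.map (fun r => pvLook r "instruction_text")))
  let merged_gesture := PySem.Str.strip (PySem.Str.join delimiter (gesture_sorted.map (fun r => pvLook r "instruction_text")))
  [("voice", merged_voice), ("gesture", merged_gesture)]

-- ===== PORT B =====
def merge_session_commands_alt (session_commands : List (List (String × String))) (delimiter : String) : List (String × String) :=
  -- decorate-filter: the combined (timestamp, (modality, text)) stream
  let stream := (session_commands.filter
      (fun cmd => pvLook cmd "modality" == "voice" || pvLook cmd "modality" == "gesture")).map
      (fun cmd => (pvLook cmd "timestamp", (pvLook cmd "modality", pvLook cmd "instruction_text")))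
  -- one stable sort of the whole stream by timestamp
  let sortedStream := PySem.List.sorted stream (fun t => t.1) false
  -- one splitting pass: merged = {"voice": None, "gesture": None} as an Option pair
  let merged := sortedStream.foldl
    (fun (acc : Option String × Option String) t =>
      if t.2.1 == "voice" then
        (some (match acc.1 with | none => t.2.2 | some s => s ++ delimiter ++ t.2.2), acc.2)
      else
        (acc.1, some (match acc.2 with | none => t.2.2 | some s => s ++ delimiter ++ t.2.2)))
    (none, none)
  [("voice", PySem.Str.strip (merged.1.getD "")), ("gesture", PySem.Str.strip (merged.2.getD ""))]

-- ===== PRECONDITION & SPEC =====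
-- Pre_ excludes exactly the inputs where Python A raises KeyError: a record without a
-- "modality" key, or a voice/gesture record missing "timestamp" or "instruction_text".
def Pre_merge_session_commands (session_commands : List (List (String × String))) (_delimiter : String) : Prop :=
  ∀ cmd ∈ session_commands, pvHas cmd "modality" = true ∧
    ((pvLook cmd "modality" = "voice" ∨ pvLook cmd "modality" = "gesture") →
      pvHas cmd "timestamp" = true ∧ pvHas cmd "instruction_text" = true)
instance (session_commands : List (List (String × String))) (delimiter : String) : Decidable (Pre_merge_session_commands session_commands delimiter) := by unfold Pre_merge_session_commands; infer_instance

def pvWitness_merge_session_commands : (List (List (String × String))) × String :=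
  ([[("modality", "voice"), ("timestamp", "1"), ("instruction_text", "hi")],
    [("modality", "gesture"), ("timestamp", "2"), ("instruction_text", "up")]], "\n")

def Spec_merge_session_commands (session_commands : List (List (String × String))) (delimiter : String) (out : List (String × String)) : Prop := out = merge_session_commands_alt session_commands delimiter
instance (session_commands : List (List (String × String))) (delimiter : String) (out : List (String × String)) : Decidable (Spec_merge_session_commands session_commands delimiter out) := by unfold Spec_merge_session_commands; infer_instance

-- ===== CLAIM (what is proved, stated in full; the proofs are below) =====
def Claim_equal_merge_session_commands : Prop := ∀ (session_commands : List (List (String × String))) (delimiter : String), Dom_merge_session_commands session_commands delimiter → Pre_merge_session_commands session_commands delimiter → Spec_merge_session_commands session_commands delimiter (merge_session_commands session_commands delimiter)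

-- ===== LEMMAS AND PROOFS =====

-- the decorated triple B extracts from a record
def pvProj (cmd : List (String × String)) : String × String × String :=
  (pvLook cmd "timestamp", (pvLook cmd "modality", pvLook cmd "instruction_text"))

-- B's accumulation step for one group
def pvAcc (delim : String) (a : Option String) (x : String) : Option String :=
  some (match a with | none => x | some s => s ++ delim ++ x)

-- inserting an element smaller than everything present goes to the front
lemma insertBy_of_lt_all {α : Type} (key : α → String) (x : α) (l : List α)
    (h : ∀ z ∈ l, key x < key z) :
    PySem.List.insertBy (fun a b => decide (key a < key b)) x l = x :: l := by
  cases l with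
  | nil => rfl
  | cons y t => simp [PySem.List.insertBy, h y (by simp)]

-- filter commutes with insertBy into a key-sorted list
lemma insertBy_filter {α : Type} (key : α → String) (p : α → Bool) (x : α) (acc : List α)
    (hs : acc.Pairwise (fun a b => key a ≤ key b)) :
    (PySem.List.insertBy (fun a b => decide (key a < key b)) x acc).filter p
      = if p x then PySem.List.insertBy (fun a b => decide (key a < key b)) x (acc.filter p)
        else acc.filter p := by
  induction acc with
  | nil => cases hpx : p x <;> simp [PySem.List.insertBy, hpx]
  | cons y t ih =>
    have hy : ∀ z ∈ t, key y ≤ key z := (List.pairwise_cons.mp hs).1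
    have hst : t.Pairwise (fun a b => key a ≤ key b) := (List.pairwise_cons.mp hs).2
    by_cases hlt : key x < key y
    · rw [show PySem.List.insertBy (fun a b => decide (key a < key b)) x (y :: t) = x :: y :: t from by
        simp [PySem.List.insertBy, hlt]]
      cases hpx : p x with
      | true =>
        rw [if_pos rfl]
        have hall : ∀ z ∈ (y :: t).filter p, key x < key z := by
          intro z hz
          have hzm := (List.mem_filter.mp hz).1
          rcases List.mem_cons.mp hzm with h | h
          · exact h ▸ hlt
          · exact lt_of_lt_of_le hlt (hy z h)
        rw [insertBy_of_lt_all key x _ hall]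
        simp [List.filter_cons, hpx]
      | false => simp [List.filter_cons, hpx]
    · rw [show PySem.List.insertBy (fun a b => decide (key a < key b)) x (y :: t)
          = y :: PySem.List.insertBy (fun a b => decide (key a < key b)) x t from by
        simp [PySem.List.insertBy, hlt]]
      cases hpy : p y with
      | true =>
        cases hpx : p x with
        | true =>
          simp only [List.filter_cons, hpy, ih hst, hpx, if_true]
          rw [show PySem.List.insertBy (fun a b => decide (key a < key b)) x
                (y :: t.filter p)
              = y :: PySem.List.insertBy (fun a b => decide (key a < key b)) x (t.filter p) from by
            simp [PySem.List.insertBy, hlt]]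
        | false =>
          simp only [List.filter_cons, hpy, ih hst, hpx]
          simp
      | false =>
        cases hpx : p x with
        | true => simp only [List.filter_cons, hpy, ih hst, hpx]; simp
        | false => simp only [List.filter_cons, hpy, ih hst, hpx]; simp

-- filter commutes with the stable sort (stability, the fact B relies on)
lemma filter_sorted {α : Type} (key : α → String) (p : α → Bool) (xs : List α) :
    (PySem.List.sorted xs key false).filter p = PySem.List.sorted (xs.filter p) key false := by
  induction xs using List.reverseRecOn with
  | nil => rfl
  | append_singleton xs x ih =>
    have h1 : PySem.List.sorted (xs ++ [x]) key false
        = PySem.List.insertBy (fun a b => decide (key a < key b)) x (PySem.List.sorted xs key false) := by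
      rw [PySem.List.sorted_eq_foldl_insertBy, PySem.List.sorted_eq_foldl_insertBy, List.foldl_append]
      rfl
    rw [h1, insertBy_filter key p x _ (PySem.List.sorted_pairwise xs key), ih]
    cases hpx : p x with
    | true =>
      rw [if_pos rfl, List.filter_append]
      simp only [List.filter_cons, hpx, List.filter_nil]
      rw [PySem.List.sorted_eq_foldl_insertBy, PySem.List.sorted_eq_foldl_insertBy, List.foldl_append]
      rfl
    | false =>
      rw [if_neg (by simp), List.filter_append]
      simp [hpx]

-- insertBy commutes with mapping a key-preserving projection
lemma insertBy_map (f : List (String × String) → String × String × String)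
    (key : List (String × String) → String) (hkey : ∀ x, (f x).1 = key x)
    (x : List (String × String)) (ys : List (List (String × String))) :
    PySem.List.insertBy (fun a b => decide (a.1 < b.1)) (f x) (ys.map f)
      = (PySem.List.insertBy (fun a b => decide (key a < key b)) x ys).map f := by
  induction ys with
  | nil => simp [PySem.List.insertBy]
  | cons y t ih =>
    simp only [List.map_cons, PySem.List.insertBy, hkey]
    by_cases h : key x < key y
    · rw [if_pos (by simpa using h), if_pos (by simpa using h)]; rfl
    · rw [if_neg (by simpa using h), if_neg (by simpa using h), ih, List.map_cons]

-- the stable sort commutes with the projection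
lemma sorted_map (f : List (String × String) → String × String × String)
    (key : List (String × String) → String) (hkey : ∀ x, (f x).1 = key x)
    (xs : List (List (String × String))) :
    PySem.List.sorted (xs.map f) (fun p => p.1) false
      = (PySem.List.sorted xs key false).map f := by
  rw [PySem.List.sorted_eq_foldl_insertBy, PySem.List.sorted_eq_foldl_insertBy]
  suffices h : ∀ (acc : List (List (String × String))),
      (xs.map f).foldl (fun acc x => PySem.List.insertBy (fun a b => decide (a.1 < b.1)) x acc) (acc.map f)
        = (xs.foldl (fun acc x => PySem.List.insertBy (fun a b => decide (key a < key b)) x acc) acc).map f by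
    simpa using h []
  induction xs with
  | nil => simp
  | cons c t ih =>
    intro acc
    rw [List.map_cons, List.foldl_cons, List.foldl_cons, insertBy_map f key hkey]
    exact ih _

-- B's splitting fold is the pair of per-group accumulations
lemma fold_split (delim : String) (S : List (String × String × String))
    (a b : Option String) :
    S.foldl
      (fun (acc : Option String × Option String) t =>
        if t.2.1 == "voice" then
          (some (match acc.1 with | none => t.2.2 | some s => s ++ delim ++ t.2.2), acc.2)
        else
          (acc.1, some (match acc.2 with | none => t.2.2 | some s => s ++ delim ++ t.2.2))) (a, b)
    = (((S.filter (fun t => t.2.1 == "voice")).map (fun t => t.2.2)).foldl (pvAcc delim) a,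
       ((S.filter (fun t => !(t.2.1 == "voice"))).map (fun t => t.2.2)).foldl (pvAcc delim) b) := by
  induction S generalizing a b with
  | nil => rfl
  | cons c t ih =>
    rw [List.foldl_cons]
    by_cases hv : c.2.1 = "voice"
    · simp only [List.filter_cons, hv]
      rw [show (if (("voice" : String) == "voice") = true then
            (some (match a with | none => c.2.2 | some s => s ++ delim ++ c.2.2), b)
          else (a, some (match b with | none => c.2.2 | some s => s ++ delim ++ c.2.2)))
          = (pvAcc delim a c.2.2, b) from by simp [pvAcc]]
      rw [ih]
      simp
    · simp only [List.filter_cons]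
      rw [show (if (c.2.1 == "voice") = true then
            (some (match a with | none => c.2.2 | some s => s ++ delim ++ c.2.2), b)
          else (a, some (match b with | none => c.2.2 | some s => s ++ delim ++ c.2.2)))
          = (a, pvAcc delim b c.2.2) from by simp [pvAcc, hv]]
      rw [ih]
      simp [hv]

-- Str-level join facts (proved through the Chars layer)
lemma str_join_singleton (d h : String) : PySem.Str.join d [h] = h := by
  apply String.toList_inj.mp
  rw [PySem.Str.toList_join]
  simp [PySem.Chars.join_singleton]

lemma str_join_cons_cons (d p q : String) (rest : List String) :
    PySem.Str.join d (p :: q :: rest) = p ++ d ++ PySem.Str.join d (q :: rest) := by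
  apply String.toList_inj.mp
  rw [PySem.Str.toList_join]
  simp only [List.map_cons, PySem.Chars.join_cons_cons, String.toList_append, PySem.Str.toList_join]

-- the accumulation over a group equals delimiter.join of its texts
-- join absorbs a delimiter glued into the head
lemma str_join_glue (d p q : String) (t : List String) :
    PySem.Str.join d ((p ++ d ++ q) :: t) = p ++ d ++ PySem.Str.join d (q :: t) := by
  cases t with
  | nil => rw [str_join_singleton, str_join_singleton]
  | cons r rest =>
    rw [str_join_cons_cons, str_join_cons_cons]
    simp [String.append_assoc]

lemma acc_chain (delim s : String) (ts : List String) :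
    ts.foldl (pvAcc delim) (some s) = some (PySem.Str.join delim (s :: ts)) := by
  induction ts generalizing s with
  | nil => rw [str_join_singleton]; rfl
  | cons h t ih =>
    rw [List.foldl_cons, show pvAcc delim (some s) h = some (s ++ delim ++ h) from rfl, ih,
      str_join_glue, str_join_cons_cons]

lemma acc_join (delim : String) (ts : List String) :
    (ts.foldl (pvAcc delim) none).getD "" = PySem.Str.join delim ts := by
  cases ts with
  | nil => rfl
  | cons h t =>
    rw [List.foldl_cons, show pvAcc delim none h = some h from rfl, acc_chain]
    rfl

-- B's sorted combined stream, filtered to one modality and mapped to texts,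
-- is A's per-group sorted text list
lemma stream_group (sc : List (List (String × String))) (m : String)
    (hm : m = "voice" ∨ m = "gesture") :
    ((PySem.List.sorted ((sc.filter
        (fun cmd => pvLook cmd "modality" == "voice" || pvLook cmd "modality" == "gesture")).map pvProj)
        (fun t => t.1) false).filter (fun t => t.2.1 == m)).map (fun t => t.2.2)
    = (PySem.List.sorted (sc.filter (fun cmd => pvLook cmd "modality" == m))
        (fun x => pvLook x "timestamp") false).map (fun r => pvLook r "instruction_text") := by
  rw [filter_sorted (α := String × String × String) (fun t => t.1) (fun t => t.2.1 == m), List.filter_map]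
  have hff : ((sc.filter
      (fun cmd => pvLook cmd "modality" == "voice" || pvLook cmd "modality" == "gesture")).filter
      ((fun t => t.2.1 == m) ∘ pvProj))
      = sc.filter (fun cmd => pvLook cmd "modality" == m) := by
    rw [List.filter_filter]
    apply List.filter_congr
    intro x _
    rcases hm with h | h <;> subst h <;>
      · simp only [Function.comp, pvProj]
        by_cases hx : pvLook x "modality" = "voice" <;>
          by_cases hg : pvLook x "modality" = "gesture" <;> simp_all
  rw [hff, sorted_map pvProj (fun x => pvLook x "timestamp") (fun _ => rfl), List.map_map]
  rfl

-- every record of the combined stream is voice or gesture, so the non-voice filter is the gesture filter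
lemma not_voice_eq_gesture (sc : List (List (String × String))) :
    ((PySem.List.sorted ((sc.filter
        (fun cmd => pvLook cmd "modality" == "voice" || pvLook cmd "modality" == "gesture")).map pvProj)
        (fun t => t.1) false).filter (fun t => !(t.2.1 == "voice")))
    = ((PySem.List.sorted ((sc.filter
        (fun cmd => pvLook cmd "modality" == "voice" || pvLook cmd "modality" == "gesture")).map pvProj)
        (fun t => t.1) false).filter (fun t => t.2.1 == "gesture")) := by
  apply List.filter_congr
  intro t ht
  have hmem := (PySem.List.mem_sorted _ _ _ _).mp ht
  rcases List.mem_map.mp hmem with ⟨cmd, hcmd, hproj⟩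
  have hvg := (List.mem_filter.mp hcmd).2
  subst hproj
  simp only [pvProj]
  rcases Bool.or_eq_true_iff.mp hvg with h | h <;> simp_all

-- ===== VERDICT (by name: the statement is the Claim_ definition above) =====
theorem merge_session_commands_spec : Claim_equal_merge_session_commands := by
  intro sc delim _ _
  unfold Spec_merge_session_commands merge_session_commands merge_session_commands_alt
  simp only []
  rw [show (fun cmd => (pvLook cmd "timestamp", pvLook cmd "modality", pvLook cmd "instruction_text")) = pvProj from rfl]
  rw [fold_split]
  simp only [not_voice_eq_gesture,
    stream_group sc "voice" (Or.inl rfl), stream_group sc "gesture" (Or.inr rfl),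
    acc_join]
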